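-- pv_equiv track=rewrite | github.com/finejian/wip-case | tools.py | firstFromAndDate
-- ===== SOURCE A (Python) =====
-- __to__ = "To:"
--
-- __cc__ = "Cc:"
--
-- __from__ = "From:"
--
-- __Date__ = "Date:"
--
-- __finance__ = "SDC Finance WIP Transfer"
--
-- def firstFromAndDate(line, dateLines):
--     fr, fd = "", ""
--     if (line.startswith(__to__) or line.startswith(__cc__)) and line.find(__finance__) > 0:
--         for l in dateLines:
--             if l.startswith(__from__):
--                 frs = l.replace(__from__, "").strip().replace("CN=", "").split("/")
--                 if len(frs) > 0:
--                     fr = frs[0]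
--             if l.startswith(__Date__):
--                 fd = l.replace(__Date__, "").strip()
--     return fr, fd
-- ===== SOURCE B (Python) =====
-- def firstFromAndDate(line, dateLines):
--     if not ((line.startswith("To:") or line.startswith("Cc:"))
--             and line.find("SDC Finance WIP Transfer") > 0):
--         return "", ""
--     fr = next((l.replace("From:", "").strip().replace("CN=", "").split("/")[0]
--                for l in reversed(dateLines) if l.startswith("From:")), "")
--     fd = next((l.replace("Date:", "").strip()
--                for l in reversed(dateLines) if l.startswith("Date:")), "")
--     return fr, fd
-- ===== Notes on version B (the rewrite author's own statement) =====
-- stated objective: simpler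
-- what changed: Instead of one forward loop that keeps overwriting fr/fd, B early-returns on the guard and finds the last From: line and last Date: line by two reverse scans with early exit (next over reversed), applying the transform once to each found line.
import Mathlib
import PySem

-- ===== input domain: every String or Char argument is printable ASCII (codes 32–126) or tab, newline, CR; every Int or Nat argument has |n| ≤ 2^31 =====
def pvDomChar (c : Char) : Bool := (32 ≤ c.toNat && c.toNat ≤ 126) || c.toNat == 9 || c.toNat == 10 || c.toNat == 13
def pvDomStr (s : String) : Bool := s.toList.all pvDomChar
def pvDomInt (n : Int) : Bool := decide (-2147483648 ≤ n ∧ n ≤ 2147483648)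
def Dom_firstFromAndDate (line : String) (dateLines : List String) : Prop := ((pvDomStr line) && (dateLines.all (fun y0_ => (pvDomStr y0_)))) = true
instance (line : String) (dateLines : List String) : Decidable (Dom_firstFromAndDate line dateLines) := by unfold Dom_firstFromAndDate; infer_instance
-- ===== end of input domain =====

-- B replaces A's single forward loop that overwrites fr/fd with an early guard return and two
-- reverse scans with early exit (last From:/Date: line found directly); same result, simpler flow.


-- ===== PORT A =====
-- A-side helper: the body of A's 'for l in dateLines' loop, acting on the (fr, fd) state.
def pvBodyA (st : String × String) (l : String) : String × String :=
  let st1 :=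
    if PySem.Str.startswith l "From:" then
      -- l.replace("From:","").strip().replace("CN=","").split("/"); sep "/" ≠ "" so split? is some
      let frs := (PySem.Str.split? (PySem.Str.replace (PySem.Str.strip (PySem.Str.replace l "From:" "")) "CN=" "") "/").getD []
      if frs.length > 0 then (frs.getD 0 "", st.2) else st
    else st
  if PySem.Str.startswith l "Date:" then (st1.1, PySem.Str.strip (PySem.Str.replace l "Date:" "")) else st1

def firstFromAndDate (line : String) (dateLines : List String) : String × String :=
  if ((PySem.Str.startswith line "To:" || PySem.Str.startswith line "Cc:")
      && decide (PySem.Str.find line "SDC Finance WIP Transfer" > 0)) then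
    dateLines.foldl pvBodyA ("", "")
  else ("", "")

-- ===== PORT B =====
-- B-side helpers: the transforms applied to the found From:/Date: line.
def pvFromVal (l : String) : String :=
  ((PySem.Str.split? (PySem.Str.replace (PySem.Str.strip (PySem.Str.replace l "From:" "")) "CN=" "") "/").getD []).getD 0 ""

def pvDateVal (l : String) : String :=
  PySem.Str.strip (PySem.Str.replace l "Date:" "")

def firstFromAndDate_alt (line : String) (dateLines : List String) : String × String :=
  if !((PySem.Str.startswith line "To:" || PySem.Str.startswith line "Cc:")
      && decide (PySem.Str.find line "SDC Finance WIP Transfer" > 0)) then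
    ("", "")
  else
    -- next(... for l in reversed(dateLines) if l.startswith(...)), default ""
    let fr := match dateLines.reverse.find? (fun l => PySem.Str.startswith l "From:") with
              | some l => pvFromVal l
              | none => ""
    let fd := match dateLines.reverse.find? (fun l => PySem.Str.startswith l "Date:") with
              | some l => pvDateVal l
              | none => ""
    (fr, fd)

-- ===== PRECONDITION & SPEC =====
def Spec_firstFromAndDate (line : String) (dateLines : List String) (out : String × String) : Prop := out = firstFromAndDate_alt line dateLines
instance (line : String) (dateLines : List String) (out : String × String) : Decidable (Spec_firstFromAndDate line dateLines out) := by unfold Spec_firstFromAndDate; infer_instance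

-- ===== CLAIM (what is proved, stated in full; the proofs are below) =====
def Claim_equal_firstFromAndDate : Prop := ∀ (line : String) (dateLines : List String), Dom_firstFromAndDate line dateLines → Spec_firstFromAndDate line dateLines (firstFromAndDate line dateLines)

-- ===== LEMMAS AND PROOFS =====

-- splitOn's worker always produces at least one piece
lemma pv_go_ne_nil (sep : List Char) : ∀ (fuel : Nat) (l cur : List Char) (acc : List (List Char)),
    PySem.Chars.splitOn.go sep fuel l cur acc ≠ [] := by
  intro fuel
  induction fuel with
  | zero => intro l cur acc; rw [PySem.Chars.splitOn.go.eq_def]; simp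
  | succ n ih =>
    intro l cur acc
    rw [PySem.Chars.splitOn.go.eq_def]
    cases l with
    | nil => simp
    | cons c rest =>
      simp only
      split_ifs with h
      · exact ih _ _ _
      · exact ih _ _ _

lemma pv_split_slash_ne_nil (s : String) : (PySem.Str.split? s "/").getD [] ≠ [] := by
  simp only [PySem.Str.split?, PySem.Chars.split?]
  simp [PySem.Chars.splitOn, pv_go_ne_nil]

-- the loop body acts componentwise
lemma pvBodyA_eq (st : String × String) (l : String) :
    pvBodyA st l = ((if PySem.Str.startswith l "From:" then pvFromVal l else st.1),
                    (if PySem.Str.startswith l "Date:" then pvDateVal l else st.2)) := by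
  have hne := pv_split_slash_ne_nil (PySem.Str.replace (PySem.Str.strip (PySem.Str.replace l "From:" "")) "CN=" "")
  have hlen : 0 < ((PySem.Str.split? (PySem.Str.replace (PySem.Str.strip (PySem.Str.replace l "From:" "")) "CN=" "") "/").getD []).length :=
    List.length_pos_iff.mpr hne
  simp only [pvBodyA, pvFromVal, pvDateVal]
  split_ifs with h1 h2 h2 <;> simp_all

-- A's forward overwrite loop computes B's last-match-per-key values
lemma pv_loop_eq : ∀ (xs : List String) (a b : String),
    xs.foldl pvBodyA (a, b) =
      ((match xs.reverse.find? (fun l => PySem.Str.startswith l "From:") with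
        | some l => pvFromVal l | none => a),
       (match xs.reverse.find? (fun l => PySem.Str.startswith l "Date:") with
        | some l => pvDateVal l | none => b)) := by
  intro xs
  induction xs with
  | nil => intro a b; simp
  | cons x xs ih =>
    intro a b
    rw [List.foldl_cons, pvBodyA_eq, ih]
    rw [List.reverse_cons, List.find?_append, List.find?_append]
    rcases hF : xs.reverse.find? (fun l => PySem.Str.startswith l "From:") with _ | lf <;>
    rcases hD : xs.reverse.find? (fun l => PySem.Str.startswith l "Date:") with _ | ld <;>
      simp [List.find?] <;>
      cases hc1 : PySem.Chars.startswith x.toList ['F', 'r', 'o', 'm', ':'] <;>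
      cases hc2 : PySem.Chars.startswith x.toList ['D', 'a', 't', 'e', ':'] <;>
      simp

-- ===== VERDICT (by name: the statement is the Claim_ definition above) =====
theorem firstFromAndDate_spec : Claim_equal_firstFromAndDate := by
  intro line dateLines _
  unfold Spec_firstFromAndDate firstFromAndDate firstFromAndDate_alt
  rcases hg : ((PySem.Str.startswith line "To:" || PySem.Str.startswith line "Cc:")
      && decide (PySem.Str.find line "SDC Finance WIP Transfer" > 0)) with _ | _
  · simp
  · simp only [if_true, Bool.not_true, Bool.false_eq_true, if_false]
    rw [pv_loop_eq]
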